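-- pv_equiv track=rewrite | github.com/21harley/social_oplesk-challenges | challenges python/reto 17_01_2023/main.py | interar
-- ===== SOURCE A (Python) =====
-- def val_init(string):
--     return string[0:1] != 'b'
--
-- def upper_fin(string):
--     long_cadena=len(string)
--     return string[0:long_cadena-1]+(string[long_cadena-1:long_cadena].upper())
--
-- def interval_bar(string):
--     long_cadena=int(len(string)/2)
--     return string[0:long_cadena]+"-"+(string[long_cadena:long_cadena*2])
--
-- def interar(array,i):
--     if(i==0):
--         array=list(array)
--     if(len(array)!=i):
--         if(val_init(array[i])):
--             if(len(array[i])%2==0):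
--                 array[i]=interval_bar(array[i])
--             else:
--                 array[i]=upper_fin(array[i])
--         else:
--             array.pop(i)
--             i=i-1
--         interar(array, i+1)
--     return array
-- ===== SOURCE B (Python) =====
-- def val_init(string):
--     return string[0:1] != 'b'
--
-- def upper_fin(string):
--     long_cadena = len(string)
--     return string[0:long_cadena-1] + (string[long_cadena-1:long_cadena].upper())
--
-- def interval_bar(string):
--     long_cadena = int(len(string)/2)
--     return string[0:long_cadena] + "-" + (string[long_cadena:long_cadena*2])
--
-- def interar(array, i):
--     # Return-value equivalence with A (A mutates its argument in place when i != 0;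
--     # B always builds a fresh list): untouched prefix + transformed kept suffix.
--     return array[:i] + [interval_bar(s) if len(s) % 2 == 0 else upper_fin(s)
--                         for s in array[i:] if val_init(s)]
-- ===== Notes on version B (the rewrite author's own statement) =====
-- stated objective: simpler
-- what changed: Replaces A's in-place recursion with index bookkeeping (setitem, pop, i=i-1/i+1, copy-on-i==0) by a single non-mutating slice + filtered comprehension: untouched prefix array[:i] plus the kept suffix elements transformed; equivalence is about the return value only (A mutates its argument when i != 0, B never mutates).
-- intended difference: When i == 0, the first string starts with 'b', and the tail contains a string the processing would alter (a 'b'-initial one, one of even length, or one ending in a lowercase ASCII letter), A pops the head, recurses with the index back at 0, copies the list there and discards all further work, returning the tail unprocessed; B drops the head and still transforms/filters the tail, which is the function's evident intent (outside that region the tail is a fixed point and the two agree, proved exact by interar_tight). — e.g. on interar(["b", "aa"], 0): A returns ["aa"], B returns ["a-a"]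
-- outside the precondition, e.g. on interar(['aaa', 'b', 'c'], -2): A returns ['aaA', 'C'], B returns ['aaa', 'C']
import Mathlib
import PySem

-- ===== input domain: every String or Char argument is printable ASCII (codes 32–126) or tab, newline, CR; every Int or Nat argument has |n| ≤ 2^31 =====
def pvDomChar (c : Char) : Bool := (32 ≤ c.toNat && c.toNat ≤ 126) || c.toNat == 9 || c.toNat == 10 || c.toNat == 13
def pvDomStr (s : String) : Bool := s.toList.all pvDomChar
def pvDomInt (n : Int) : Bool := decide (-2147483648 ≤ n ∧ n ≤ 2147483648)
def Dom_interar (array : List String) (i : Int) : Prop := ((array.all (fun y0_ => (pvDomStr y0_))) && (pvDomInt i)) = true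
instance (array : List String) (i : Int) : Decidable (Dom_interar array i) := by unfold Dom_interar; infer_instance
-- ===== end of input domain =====

-- B replaces A's index-juggling recursion (mutate-in-place / pop / i-1 bookkeeping) by one
-- slice-filter-map expression; equivalence is about the RETURN value only (A mutates its
-- argument in place when i != 0, B never mutates).

-- ===== PORT A =====
-- Helpers shared by both Python files (ported through PySem.Chars; exact on the domain).
-- val_init(string): string[0:1] != 'b'
def val_init (s : String) : Bool := !(PySem.Chars.slice s.toList (some 0) (some 1) == ['b'])

-- upper_fin(string): string[0:len-1] + string[len-1:len].upper()
def upper_fin (s : String) : String :=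
  let n : Int := s.toList.length
  String.ofList (PySem.Chars.slice s.toList (some 0) (some (n - 1)) ++
                 PySem.Chars.upper (PySem.Chars.slice s.toList (some (n - 1)) (some n)))

-- interval_bar(string): long = int(len(string)/2)  (= len // 2 exactly, len is a nonnegative
-- machine-size int); string[0:long] + "-" + string[long:long*2]
def interval_bar (s : String) : String :=
  let m : Int := PySem.Int.floordiv (s.toList.length : Int) 2
  String.ofList (PySem.Chars.slice s.toList (some 0) (some m) ++ ['-'] ++
                 PySem.Chars.slice s.toList (some m) (some (m * 2)))

-- A's recursion, value semantics.  `if i==0: array = list(array)` is a fresh copy: a no-op on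
-- the value, but it makes every mutation performed by a callee entered with i == 0 invisible
-- to its caller (the callee works on the copy and its return value is discarded).  That
-- aliasing is transliterated by the two `if i' = 0 then <state before the call> else <call>`
-- barriers below.  Where Python raises IndexError the PySem primitive returns none and the
-- port returns the current array (outside Pre_).
def interar (array : List String) (i : Int) : List String :=
  if (array.length : Int) ≠ i then
    match h2 : PySem.List.pyGet? array i with
    | none => array                                  -- Python: IndexError
    | some s =>
      if val_init s then
        let s' := if (s.toList.length : Int) % 2 == 0 then interval_bar s else upper_fin s
        let array' := PySem.List.pySetD array i s'   -- array[i] = s'  (in range: pyGet? succeeded)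
        if i + 1 = 0 then array' else interar array' (i + 1)
      else
        match h3 : PySem.List.pop? array i with
        | none => array                              -- unreachable: pyGet? succeeded
        | some r =>                                  -- array.pop(i); i = i-1; recurse with i+1
          if i = 0 then r.2 else interar r.2 i
  else array
termination_by ((array.length : Int) - i).toNat + array.length
decreasing_by
  · have h : PySem.Raise.InRange array.length i := by
      by_contra hn
      rw [(PySem.List.pyGet?_eq_none_iff array i).mpr hn] at h2
      simp at h2
    unfold PySem.Raise.InRange at h
    simp [PySem.List.length_pySetD]
    omega
  · have hlen := PySem.List.length_of_pop?_eq_some array h3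
    have : (((array.length : Int) - i).toNat + 1 : Nat) ≥ ((r.2.length : Int) - i).toNat + 1 := by omega
    omega

-- ===== PORT B =====
-- Source B: array[:i] + [interval_bar(s) if len(s)%2==0 else upper_fin(s) for s in array[i:] if val_init(s)]
def transformB (s : String) : String :=
  if (s.toList.length : Int) % 2 == 0 then interval_bar s else upper_fin s

def interar_alt (array : List String) (i : Int) : List String :=
  PySem.List.slice array none (some i) ++
    ((PySem.List.slice array (some i) none).filter val_init).map transformB

-- ===== PRECONDITION & SPEC =====
-- Pre_ excludes i > len(array), where A raises IndexError, and the negative starting indices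
-- whose visited suffix contains a 'b'-initial string: there A pops at a negative index, which
-- shifts the wraparound position backwards, and A then raises IndexError on some inputs and
-- returns an accidental re-processing of already-visited elements on others.  Negative i over
-- a pop-free suffix stays inside Pre_ (A and B agree there).
def Pre_interar (array : List String) (i : Int) : Prop :=
  (0 ≤ i ∧ i ≤ (array.length : Int)) ∨
    (-(array.length : Int) ≤ i ∧ i < 0 ∧
      ∀ s ∈ array.drop (array.length + i).toNat, s.toList.head? ≠ some 'b')
instance (array : List String) (i : Int) : Decidable (Pre_interar array i) := by unfold Pre_interar; infer_instance
def pvWitness_interar : List String × Int := (["aa", "bc"], 0)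

-- When i = 0 and the first string starts with 'b', A pops it and the rest of the work lands on
-- a discarded copy, so A returns the input minus its head with the remaining strings
-- unprocessed; B drops the head and still transforms/filters the rest, which is the intended
-- behaviour of the function.  D_ is restricted to the tails the processing actually alters
-- (some remaining string is 'b'-initial, of even length, or ends in a lowercase ASCII letter),
-- so that A and B differ exactly on D_ (proved below as Claim_exact_interar).
def pyAlters (s : String) : Bool :=
  s.toList.head? == some 'b' || s.toList.length % 2 == 0 ||
    s.toList.getLast?.any PySem.Chars.islower
def D_interar (array : List String) (i : Int) : Prop :=
  i = 0 ∧ (array.head?.bind (fun s => s.toList.head?)) = some 'b' ∧ array.tail.any pyAlters = true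
instance (array : List String) (i : Int) : Decidable (D_interar array i) := by unfold D_interar; infer_instance

def Spec_interar (array : List String) (i : Int) (out : List String) : Prop :=
  ¬ D_interar array i → out = interar_alt array i
instance (array : List String) (i : Int) (out : List String) : Decidable (Spec_interar array i out) := by unfold Spec_interar; infer_instance

def pvDiffWitness_interar : List String × Int := (["b", "aa"], 0)
def pvDiffWitnessOut_interar : (List String) × (List String) := (["aa"], ["a-a"])

-- ===== CLAIM (what is proved, stated in full; the proofs are below) =====
def Claim_unchanged_interar : Prop := ∀ (array : List String) (i : Int), Dom_interar array i → Pre_interar array i → Spec_interar array i (interar array i)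
def Claim_changed_interar : Prop := Dom_interar (pvDiffWitness_interar.1) (pvDiffWitness_interar.2) ∧ Pre_interar (pvDiffWitness_interar.1) (pvDiffWitness_interar.2) ∧ D_interar (pvDiffWitness_interar.1) (pvDiffWitness_interar.2) ∧ interar (pvDiffWitness_interar.1) (pvDiffWitness_interar.2) = pvDiffWitnessOut_interar.1 ∧ interar_alt (pvDiffWitness_interar.1) (pvDiffWitness_interar.2) = pvDiffWitnessOut_interar.2 ∧ pvDiffWitnessOut_interar.1 ≠ pvDiffWitnessOut_interar.2

def Claim_exact_interar : Prop := ∀ (array : List String) (i : Int), Dom_interar array i → Pre_interar array i → D_interar array i → interar array i ≠ interar_alt array i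

-- ===== LEMMAS AND PROOFS =====

-- abbreviation for B's "filter then transform" tail
theorem val_init_iff (s : String) : val_init s = true ↔ s.toList.head? ≠ some 'b' := by
  cases hl : s.toList with
  | nil => simp [val_init, hl, PySem.List.slice_to]
  | cons c cs => simp [val_init, hl, PySem.List.slice_to]

-- core invariant of A's recursion for a starting index ≥ 1 (no pop can bring the index back
-- to 0, so the i==0 copy barrier is never hit): A computes B's slice-filter-map expression.
theorem interar_core : ∀ (n : Nat) (array : List String) (i : Int),
    ((array.length : Int) - i).toNat + array.length ≤ n → 1 ≤ i → i ≤ (array.length : Int) →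
    interar array i =
      array.take i.toNat ++ ((array.drop i.toNat).filter val_init).map transformB := by
  intro n
  induction n with
  | zero => intro array i hm h1 h2; omega
  | succ n ih =>
    intro array i hm h1 h2
    by_cases hlen : (array.length : Int) = i
    · rw [interar, if_neg (by omega)]
      have hk : i.toNat = array.length := by omega
      simp [hk]
    · have hilt : i < (array.length : Int) := by omega
      have hkn : i.toNat < array.length := by omega
      have hget := PySem.List.pyGet?_eq_some_getElem array (by omega) hilt
      rw [interar, if_pos (by omega), hget]
      by_cases hv : val_init (array[i.toNat]) = true
      · simp only [hv, if_true]
        rw [if_neg (by omega)]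
        have hset : PySem.List.pySetD array i (transformB array[i.toNat])
            = array.take i.toNat ++ transformB array[i.toNat] :: array.drop (i.toNat + 1) := by
          rw [PySem.List.pySetD_of_nonneg array _ (by omega),
              List.set_eq_take_append_cons_drop, if_pos hkn]
        show interar (PySem.List.pySetD array i (transformB array[i.toNat])) (i + 1)
            = List.take i.toNat array ++ List.map transformB (List.filter val_init (List.drop i.toNat array))
        rw [hset, ih _ (i + 1)
              (by simp [List.length_append, List.length_take, List.length_drop]; omega)
              (by omega)
              (by simp [List.length_append, List.length_take, List.length_drop]; omega)]
        have htn : (i + 1).toNat = i.toNat + 1 := by omega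
        have hlt : (array.take i.toNat).length = i.toNat := by
          simp [List.length_take]; omega
        rw [htn]
        rw [List.drop_eq_getElem_cons hkn, List.filter_cons, hv]
        have h1' : (array.take i.toNat ++ transformB array[i.toNat] :: array.drop (i.toNat + 1)).take (i.toNat + 1)
            = array.take i.toNat ++ [transformB array[i.toNat]] := by
          rw [show array.take i.toNat ++ transformB array[i.toNat] :: array.drop (i.toNat + 1)
                = (array.take i.toNat ++ [transformB array[i.toNat]]) ++ array.drop (i.toNat + 1) by simp,
              List.take_left' (by simp [hlt])]
        have h2' : (array.take i.toNat ++ transformB array[i.toNat] :: array.drop (i.toNat + 1)).drop (i.toNat + 1)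
            = array.drop (i.toNat + 1) := by
          rw [show array.take i.toNat ++ transformB array[i.toNat] :: array.drop (i.toNat + 1)
                = (array.take i.toNat ++ [transformB array[i.toNat]]) ++ array.drop (i.toNat + 1) by simp,
              List.drop_left' (by simp [hlt])]
        rw [h1', h2']
        simp
      · simp only [hv, if_false, Bool.false_eq_true]
        have hi : i = (i.toNat : Int) := by omega
        have hv' : val_init array[i.toNat] = false := by simpa using hv
        have hpop := PySem.List.pop?_natCast array i.toNat hkn
        rw [← hi] at hpop
        rw [hpop]
        show (if i = 0 then _ else interar (array.eraseIdx i.toNat) i) = _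
        rw [if_neg (by omega)]
        have hlen' : (array.eraseIdx i.toNat).length = array.length - 1 := by
          rw [List.length_eraseIdx, if_pos hkn]
        rw [ih (array.eraseIdx i.toNat) i (by omega) (by omega) (by omega)]
        rw [List.eraseIdx_eq_take_drop_succ,
            List.take_left' (by simp [List.length_take]; omega),
            List.drop_left' (by simp [List.length_take]; omega),
            List.drop_eq_getElem_cons hkn, List.filter_cons, hv']
        simp

-- setting at a negative in-range index wraps from the end (exact: PySem.List.pySet? wraps)
theorem pySetD_neg {α : Type} (xs : List α) (k : Nat) (v : α) (h0 : 0 < k) (h1 : k ≤ xs.length) :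
    PySem.List.pySetD xs (-(k : Int)) v = xs.set (xs.length - k) v := by
  have hin : -((xs.length : Int)) ≤ -(k : Int) := by omega
  have hk : ¬ k = 0 := by omega
  simp [PySem.List.pySetD, PySem.List.pySet?, PySem.List.pyIdx?, hin, hk]

-- A's recursion from a negative index over a pop-free suffix: every visited element is kept
-- and transformed in place; the work done after the index reaches 0 lands on the discarded
-- copy, so the returned list is exactly prefix ++ transformed suffix.
theorem interar_core_neg : ∀ (k : Nat), ∀ (array : List String), 0 < k → k ≤ array.length →
    (∀ s ∈ array.drop (array.length - k), s.toList.head? ≠ some 'b') →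
    interar array (-(k : Int)) =
      array.take (array.length - k) ++ (array.drop (array.length - k)).map transformB := by
  intro k
  induction k with
  | zero => intro array h0; omega
  | succ k' ih =>
    intro array h0 h1 hb
    have hp : array.length - (k' + 1) < array.length := by omega
    have hget := PySem.List.pyGet?_neg_natCast array (k' + 1) (by omega) h1
    rw [List.getElem?_eq_getElem hp] at hget
    have hmem : array[array.length - (k' + 1)] ∈ array.drop (array.length - (k' + 1)) := by
      rw [List.drop_eq_getElem_cons hp]; exact List.mem_cons_self
    have hv : val_init (array[array.length - (k' + 1)]) = true :=
      (val_init_iff _).mpr (hb _ hmem)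
    rw [interar, if_pos (by push_cast; omega), hget]
    simp only [hv, if_true]
    have htB : ∀ t : String,
        (if ((t.toList.length : Int)) % 2 == 0 then interval_bar t else upper_fin t)
          = transformB t := fun _ => rfl
    simp only [htB]
    rw [pySetD_neg array (k' + 1) _ (by omega) h1]
    have hset : array.set (array.length - (k' + 1)) (transformB array[array.length - (k' + 1)])
        = array.take (array.length - (k' + 1))
            ++ transformB array[array.length - (k' + 1)] :: array.drop (array.length - k') := by
      rw [List.set_eq_take_append_cons_drop, if_pos hp,
          show array.length - (k' + 1) + 1 = array.length - k' by omega]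
    have hsplit : array.take (array.length - (k' + 1))
          ++ transformB array[array.length - (k' + 1)] :: array.drop (array.length - k')
        = (array.take (array.length - (k' + 1)) ++ [transformB array[array.length - (k' + 1)]])
            ++ array.drop (array.length - k') := by simp
    have htk : (array.take (array.length - (k' + 1))).length = array.length - (k' + 1) := by
      rw [List.length_take]; omega
    have hrhs : (array.drop (array.length - (k' + 1))).map transformB
        = transformB array[array.length - (k' + 1)]
            :: (array.drop (array.length - k')).map transformB := by
      rw [List.drop_eq_getElem_cons hp, List.map_cons,
          show array.length - (k' + 1) + 1 = array.length - k' by omega]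
    by_cases hk0 : k' = 0
    · subst hk0
      rw [if_pos (by omega), hset, hrhs]
      have hd : array.drop (array.length - 0) = [] := by simp
      rw [hd]
      simp
    · rw [if_neg (by omega),
          show (-(((k' + 1 : Nat)) : Int)) + 1 = -((k' : Nat) : Int) by push_cast; ring,
          hset]
      have hblen : (array.take (array.length - (k' + 1))
            ++ transformB array[array.length - (k' + 1)] :: array.drop (array.length - k')).length
          = array.length := by
        simp; omega
      rw [ih _ (by omega) (by omega) ?hb]
      case hb =>
        intro t ht
        rw [hblen, hsplit, List.drop_left' (by simp [htk]; omega)] at ht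
        refine hb t (List.drop_subset 1 _ ?_)
        rw [List.drop_drop, show array.length - (k' + 1) + 1 = array.length - k' by omega]
        exact ht
      rw [hblen, hsplit, List.take_left' (by simp [htk]; omega),
          List.drop_left' (by simp [htk]; omega), hrhs]
      simp


-- ----- the transformation's fixed points (for the exactness of D_) -----

theorem upperChar_ne (c : Char) (h : PySem.Chars.islower c = true) : PySem.Chars.upperChar c ≠ c := by
  simp [PySem.Chars.islower] at h
  obtain ⟨h1, h2⟩ := h
  have hc1 : ('a' : Char).toNat ≤ c.toNat := Fin.mk_le_mk.mp h1
  have hc2 : c.toNat ≤ ('z' : Char).toNat := Fin.mk_le_mk.mp h2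
  have ha : ('a' : Char).toNat = 97 := by decide
  have hz : ('z' : Char).toNat = 122 := by decide
  have hval : (c.toNat - 32).isValidChar := Or.inl (by omega)
  simp [PySem.Chars.upperChar, PySem.Chars.islower, h1, h2]
  intro he
  have h2' := congrArg Char.toNat he
  rw [Char.toNat_ofNat, if_pos hval] at h2'
  omega

theorem floordiv_two_natCast (l : Nat) : PySem.Int.floordiv ((l : Nat) : Int) 2 = ((l / 2 : Nat) : Int) := by
  rw [PySem.Int.floordiv, Int.fdiv_eq_ediv_of_nonneg _ (by omega)]
  omega

theorem interval_bar_length (t : String) (he : t.toList.length % 2 = 0) :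
    (interval_bar t).toList.length = t.toList.length + 1 := by
  rw [interval_bar]
  rw [floordiv_two_natCast t.toList.length]
  rw [String.toList_ofList]
  simp only [PySem.Chars.slice_eq_listSlice]
  rw [PySem.List.slice_toNat t.toList (by omega) (by omega), PySem.List.slice_toNat t.toList (by omega) (by omega)]
  have hlen : t.toList.length = t.length := by simp
  simp [List.length_take, List.length_drop]
  omega

theorem upper_fin_toList (t : String) (h : t.toList ≠ []) :
    (upper_fin t).toList
      = t.toList.dropLast ++ [PySem.Chars.upperChar (t.toList.getLast h)] := by
  rw [upper_fin]
  rw [String.toList_ofList]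
  simp only [PySem.Chars.slice_eq_listSlice]
  have hl : 0 < t.toList.length := List.length_pos_iff.mpr h
  rw [PySem.List.slice_toNat t.toList (by omega) (by omega), PySem.List.slice_toNat t.toList (by omega) (by omega)]
  congr 1
  · rw [List.dropLast_eq_take]
    simp only [Int.toNat_zero, Nat.sub_zero, List.drop_zero]
    congr 1
    omega
  · have hdrop : t.toList.drop (((t.toList.length : Int) - 1).toNat) = [t.toList.getLast h] := by
      rw [show ((t.toList.length : Int) - 1).toNat = t.toList.length - 1 by omega]
      rw [List.drop_eq_getElem_cons (by omega)]
      rw [List.drop_eq_nil_iff.mpr (by omega)]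
      congr 1
      exact (List.getLast_eq_getElem h).symm
    rw [hdrop]
    have : ((t.toList.length : Int).toNat - ((t.toList.length : Int) - 1).toNat) = 1 := by omega
    rw [this]
    simp [PySem.Chars.upper]

-- a kept string that pyAlters marks is really changed by the transformation
theorem transformB_ne (t : String) (hv : val_init t = true) (ha : pyAlters t = true) :
    transformB t ≠ t := by
  have hhead : t.toList.head? ≠ some 'b' := (val_init_iff t).mp hv
  by_cases he : t.toList.length % 2 = 0
  · have hcond : (((t.toList.length : Int)) % 2 == 0) = true := by rw [beq_iff_eq]; omega
    rw [transformB, if_pos hcond]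
    intro hEq
    have := congrArg (fun u : String => u.toList.length) hEq
    simp only at this
    rw [interval_bar_length t he] at this
    omega
  · have hne : t.toList ≠ [] := by
      intro hnil
      rw [hnil] at he
      simp at he
    have hgl' : t.toList.getLast? = some (t.toList.getLast hne) := List.getLast?_eq_getLast hne
    have hlow : PySem.Chars.islower (t.toList.getLast hne) = true := by
      simp [pyAlters, hgl', PySem.Chars.islower] at ha
      rcases ha with (hb | hev) | hl
      · exact absurd hb hhead
      · have hlen : t.toList.length = t.length := by simp
        omega
      · simp [PySem.Chars.islower]
        exact hl
    have hcond : ¬ ((((t.toList.length : Int)) % 2 == 0) = true) := by rw [beq_iff_eq]; omega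
    rw [transformB, if_neg hcond]
    intro hEq
    have hlist := congrArg String.toList hEq
    rw [upper_fin_toList t hne] at hlist
    have hgl := congrArg List.getLast? hlist
    rw [List.getLast?_append_cons, List.getLast?_eq_getLast hne] at hgl
    simp at hgl
    exact upperChar_ne _ hlow hgl

-- a string that pyAlters does not mark is kept verbatim
theorem transformB_fix (t : String) (ha : pyAlters t = false) : transformB t = t := by
  have hne : t.toList ≠ [] := by
    intro hnil
    simp [pyAlters, hnil] at ha
  have hgl' : t.toList.getLast? = some (t.toList.getLast hne) := List.getLast?_eq_getLast hne
  simp only [pyAlters, hgl', Option.any_some, Bool.or_eq_false_iff, beq_eq_false_iff_ne, ne_eq] at ha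
  obtain ⟨⟨hb, hev⟩, hlast⟩ := ha
  have hcond : ¬ ((((t.toList.length : Int)) % 2 == 0) = true) := by rw [beq_iff_eq]; omega
  rw [transformB, if_neg hcond]
  have : (upper_fin t).toList = t.toList := by
    rw [upper_fin_toList t hne, PySem.Chars.upperChar, if_neg (by simp [hlast])]
    exact List.dropLast_append_getLast hne
  have := congrArg String.ofList this
  simpa using this

theorem val_init_of_not_alters (t : String) (ha : pyAlters t = false) : val_init t = true := by
  rw [val_init_iff]
  intro hb
  simp [pyAlters, hb] at ha

-- over an unaltered tail, B's filter-map is the identity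
theorem filter_map_fix (rest : List String) (h : rest.any pyAlters = false) :
    (rest.filter val_init).map transformB = rest := by
  induction rest with
  | nil => simp
  | cons t r ih =>
    rw [List.any_cons] at h
    simp only [Bool.or_eq_false_iff] at h
    rw [List.filter_cons, if_pos (val_init_of_not_alters t h.1), List.map_cons,
        transformB_fix t h.1, ih h.2]

-- over an altered tail, B's filter-map moves: it is never the identity
theorem filter_map_moves (rest : List String) (h : rest.any pyAlters = true) :
    (rest.filter val_init).map transformB ≠ rest := by
  induction rest with
  | nil => simp at h
  | cons t r ih =>
    by_cases hv : val_init t = true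
    · rw [List.filter_cons, if_pos hv, List.map_cons]
      by_cases ha : pyAlters t = true
      · intro hEq
        rw [List.cons_eq_cons] at hEq
        exact transformB_ne t hv ha hEq.1
      · rw [List.any_cons] at h
        have hr : r.any pyAlters = true := by
          rcases Bool.or_eq_true_iff.mp h with h1 | h1
          · exact absurd h1 ha
          · exact h1
        intro hEq
        rw [List.cons_eq_cons] at hEq
        exact ih hr hEq.2
    · rw [List.filter_cons, if_neg hv]
      intro hEq
      have := congrArg List.length hEq
      simp only [List.length_map, List.length_cons] at this
      have hle := List.length_filter_le val_init r
      omega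

theorem interar_popzero (t : String) (rest : List String) (hv : val_init t = false) :
    interar (t :: rest) 0 = rest := by
  rw [interar, if_pos (by simp; omega), PySem.List.pyGet?_zero_cons]
  simp only [hv, Bool.false_eq_true, if_false]
  rw [PySem.List.pop?_zero_cons]
  simp

theorem interar_alt_popzero (t : String) (rest : List String) (hv : val_init t = false) :
    interar_alt (t :: rest) 0 = (rest.filter val_init).map transformB := by
  rw [interar_alt, PySem.List.slice_to _ (by omega : (0:Int) ≤ 0),
      PySem.List.slice_from _ (by omega : (0:Int) ≤ 0)]
  simp [List.filter_cons, hv]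

-- ===== VERDICT (by name: the statement is the Claim_ definition above) =====
theorem interar_spec : Claim_unchanged_interar := by
  intro array i _ hpre hnd
  show interar array i = interar_alt array i
  rcases hpre with ⟨h0, hle⟩ | ⟨hm, hneg, hb⟩
  · rw [interar_alt, PySem.List.slice_to array h0, PySem.List.slice_from array h0]
    by_cases h1 : 1 ≤ i
    · exact interar_core _ array i le_rfl h1 hle
    · have hi0 : i = 0 := by omega
      subst hi0
      cases array with
      | nil => rw [interar]; simp
      | cons s rest =>
        by_cases hbs : s.toList.head? = some 'b'
        · -- A pops the head and the rest of its work lands on the discarded copy;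
          -- outside D_ the tail is unaltered, so B's filter-map is the identity on it
          have hany : rest.any pyAlters = false := by
            by_contra hx
            exact hnd ⟨rfl, by simpa using hbs, by simpa using (Bool.not_eq_false _).mp hx⟩
          have hvf : val_init s = false := by
            have : ¬ val_init s = true := fun h => (val_init_iff s).mp h hbs
            simpa using this
          rw [interar_popzero s rest hvf]
          simp only [Int.toNat_zero, List.take_zero, List.drop_zero, List.nil_append]
          rw [List.filter_cons, if_neg (by simp [hvf]), filter_map_fix rest hany]
        · have hv : val_init s = true := (val_init_iff s).mpr hbs
          rw [interar, if_pos (by simp; omega), PySem.List.pyGet?_zero_cons]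
          simp only [hv, if_true]
          rw [if_neg (by omega)]
          show interar (PySem.List.pySetD (s :: rest) 0 (transformB s)) 1 = _
          rw [PySem.List.pySetD_of_nonneg _ _ (by omega)]
          show interar (transformB s :: rest) 1 = _
          rw [interar_core ((((transformB s :: rest).length : Int) - 1).toNat + (transformB s :: rest).length)
                (transformB s :: rest) 1 le_rfl (by omega) (by simp)]
          simp [hv]
  · -- negative start over a pop-free suffix
    have hk0 : 0 < (-i).toNat := by omega
    have hkl : (-i).toNat ≤ array.length := by omega
    have hi : i = -(((-i).toNat : Nat) : Int) := by omega
    have hpos : (array.length + i).toNat = array.length - (-i).toNat := by omega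
    rw [hpos] at hb
    rw [hi, interar_core_neg (-i).toNat array hk0 hkl hb, interar_alt,
        PySem.List.slice_to_neg_natCast array (-i).toNat hk0,
        PySem.List.slice_from_neg_natCast array (-i).toNat hk0,
        List.filter_eq_self.mpr (fun s hs => (val_init_iff s).mpr (hb s hs))]

theorem interar_changed : Claim_changed_interar := by
  unfold Claim_changed_interar
  refine ⟨by decide, by decide, by decide, ?_, by decide, by decide⟩
  show interar ["b", "aa"] 0 = ["aa"]
  unfold interar
  decide

theorem interar_tight : Claim_exact_interar := by
  intro array i _ hpre hd
  obtain ⟨hi0, hhead, hany⟩ := hd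
  subst hi0
  cases array with
  | nil => simp at hhead
  | cons t rest =>
    have hbs : t.toList.head? = some 'b' := by simpa using hhead
    have hvf : val_init t = false := by
      have : ¬ val_init t = true := fun h => (val_init_iff t).mp h hbs
      simpa using this
    rw [interar_popzero t rest hvf, interar_alt_popzero t rest hvf]
    exact fun hEq => filter_map_moves rest (by simpa using hany) hEq.symm
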